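-- pv_equiv track=rewrite | github.com/cengkader/Data-Communication-Project | datacom_utils.py | calculate_2d_parity
-- ===== SOURCE A (Python) =====
-- def text_to_binary(text):
--     """Metin girdisini 8 bitlik ASCII değerlerine göre ikili dizeye çevirir."""
--     # 'A' -> 01000001
--     return ''.join(format(ord(char), '08b') for char in text)
--
-- def calculate_2d_parity(text, block_size=8):
--     """Metin girdisi için 2D Parity (Matrix Parity) kodunu hesaplar."""
--
--     binary_data = text_to_binary(text)
--
--     # Veriyi block_size (varsayılan 8 bit/1 byte) uzunluğunda parçalara ayır
--     blocks = [binary_data[i:i + block_size] for i in range(0, len(binary_data), block_size)]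
--
--     if not blocks:
--         return "0" * (block_size + 1) # Boş veri için varsayılan dönüş
--
--     # Satır Parity'lerini hesapla
--     row_parities = ""
--     for block in blocks:
--         ones_count = block.count('1')
--         row_parities += '1' if ones_count % 2 != 0 else '0' # Çift Parity (Even Parity)
--
--     # Sütun Parity'lerini hesapla (Blokların aynı uzunlukta olduğunu varsayıyoruz)
--     column_parities = ""
--     for j in range(len(blocks[0])): # block_size (sütun sayısı)
--         col_ones_count = 0
--         for block in blocks:
--             # Eğer block boyutu tam değilse, eksik bitleri 0 kabul et
--             if j < len(block) and block[j] == '1':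
--                 col_ones_count += 1
--
--         column_parities += '1' if col_ones_count % 2 != 0 else '0'
--
--     # 2D Parity kodu: Row Parities + Column Parities
--     parity_code = row_parities + column_parities
--     return parity_code
-- ===== SOURCE B (Python) =====
-- def text_to_binary(text):
--     """Metin girdisini 8 bitlik ASCII degerlerine gore ikili dizeye cevirir."""
--     return ''.join(format(ord(char), '08b') for char in text)
--
-- def calculate_2d_parity(text, block_size=8):
--     """2D parity in ONE pass over the blocks: row parity and a column XOR
--     accumulator are maintained together, so the nested per-column rescan of the
--     blocks disappears."""
--     binary_data = text_to_binary(text)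
--     blocks = [binary_data[i:i + block_size] for i in range(0, len(binary_data), block_size)]
--     if not blocks:
--         return "0" * (block_size + 1)
--     col_acc = [0] * len(blocks[0])
--     row_parities = []
--     for block in blocks:
--         ones = 0
--         for j, bit in enumerate(block):
--             if bit == '1':
--                 ones ^= 1
--                 col_acc[j] ^= 1
--         row_parities.append('1' if ones else '0')
--     col_parities = ['1' if x else '0' for x in col_acc]
--     return ''.join(row_parities + col_parities)
-- ===== Notes on version B (the rewrite author's own statement) =====
-- stated objective: alternative
-- what changed: B computes row parities and column parities together in one pass over the blocks with a column XOR accumulator, instead of A's separate nested per-column rescan of all blocks; the Pre_ excludes only block_size = 0, where Python's range(0, n, 0) raises ValueError.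
import Mathlib
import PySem

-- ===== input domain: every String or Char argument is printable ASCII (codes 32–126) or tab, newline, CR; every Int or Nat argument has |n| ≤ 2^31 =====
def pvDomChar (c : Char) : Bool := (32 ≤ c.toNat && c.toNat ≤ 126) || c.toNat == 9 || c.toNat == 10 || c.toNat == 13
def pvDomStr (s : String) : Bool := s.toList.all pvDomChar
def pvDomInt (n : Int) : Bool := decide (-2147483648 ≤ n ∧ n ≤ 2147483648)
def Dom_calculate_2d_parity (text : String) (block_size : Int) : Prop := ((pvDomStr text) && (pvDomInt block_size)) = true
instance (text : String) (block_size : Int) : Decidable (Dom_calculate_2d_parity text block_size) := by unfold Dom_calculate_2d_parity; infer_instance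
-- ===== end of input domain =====

-- B computes the column parities in the same single pass that computes the row parities
-- (a column XOR accumulator), instead of A's second, nested per-column rescan of all blocks.

-- ===== PORT A =====
-- format(n, '08b') for 0 ≤ n: PySem.Int.toBinChars zero-padded to width 8 (exact for every n ≥ 0)
def pvFmt08b (n : Int) : List Char :=
  let s := PySem.Int.toBinChars n
  List.replicate (8 - s.length) '0' ++ s

def text_to_binary (text : String) : List Char :=
  text.toList.flatMap (fun c => pvFmt08b (c.toNat : Int))

def calculate_2d_parity (text : String) (block_size : Int) : String :=
  let binary_data := text_to_binary text
  let blocks := (PySem.List.pyRange 0 (binary_data.length : Int) block_size).map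
    (fun i => PySem.List.slice binary_data (some i) (some (i + block_size)))
  if blocks.isEmpty then
    -- "0" * (block_size + 1): empty when block_size + 1 ≤ 0, exactly like Python
    String.mk (List.replicate (block_size + 1).toNat '0')
  else
    let row_parities := blocks.foldl
      (fun acc block =>
        let ones_count : Int := (block.count '1' : Int)
        acc ++ [if PySem.Int.mod ones_count 2 ≠ 0 then '1' else '0']) []
    let column_parities := (PySem.List.pyRange 0 (blocks.headI.length : Int) 1).foldl
      (fun acc j =>
        let col_ones_count := blocks.foldl
          (fun c block =>
            if j < (block.length : Int) ∧ PySem.List.pyGetD block j ' ' = '1' then c + 1 else c)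
          (0 : Int)
        acc ++ [if PySem.Int.mod col_ones_count 2 ≠ 0 then '1' else '0']) []
    String.mk (row_parities ++ column_parities)

-- ===== PORT B =====
def calculate_2d_parity_alt (text : String) (block_size : Int) : String :=
  let binary_data := text_to_binary text
  let blocks := (PySem.List.pyRange 0 (binary_data.length : Int) block_size).map
    (fun i => PySem.List.slice binary_data (some i) (some (i + block_size)))
  match blocks with
  | [] => String.mk (List.replicate (block_size + 1).toNat '0')
  | b0 :: _ =>
    let st := blocks.foldl
      (fun (st : List Char × List Int) block =>
        let inner := (PySem.List.enumerate block 0).foldl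
          (fun (p : Int × List Int) jb =>
            if jb.2 = '1' then
              (PySem.Int.bxor p.1 1,
               PySem.List.pySetD p.2 jb.1 (PySem.Int.bxor (PySem.List.pyGetD p.2 jb.1 0) 1))
            else p)
          ((0 : Int), st.2)
        (st.1 ++ [if inner.1 ≠ 0 then '1' else '0'], inner.2))
      (([] : List Char), List.replicate b0.length (0 : Int))
    String.mk (st.1 ++ st.2.map (fun x => if x ≠ 0 then '1' else '0'))

-- ===== PRECONDITION & SPEC =====
-- Pre_ excludes exactly block_size = 0, where Python's range(0, n, 0) raises ValueError.
def Pre_calculate_2d_parity (text : String) (block_size : Int) : Prop := block_size ≠ 0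
instance (text : String) (block_size : Int) : Decidable (Pre_calculate_2d_parity text block_size) := by
  unfold Pre_calculate_2d_parity; infer_instance

def pvWitness_calculate_2d_parity : String × Int := ("Hi", 8)

def Spec_calculate_2d_parity (text : String) (block_size : Int) (out : String) : Prop :=
  out = calculate_2d_parity_alt text block_size
instance (text : String) (block_size : Int) (out : String) :
    Decidable (Spec_calculate_2d_parity text block_size out) := by
  unfold Spec_calculate_2d_parity; infer_instance

-- ===== CLAIM (what is proved, stated in full; the proofs are below) =====
def Claim_equal_calculate_2d_parity : Prop :=
  ∀ (text : String) (block_size : Int), Dom_calculate_2d_parity text block_size →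
    Pre_calculate_2d_parity text block_size →
    Spec_calculate_2d_parity text block_size (calculate_2d_parity text block_size)

-- ===== LEMMAS AND PROOFS =====

-- structural view of B's in-place column update: xor acc with block's '1' positions
def pvXorUpd : List Int → List Char → List Int
  | acc, [] => acc
  | [], _ :: _ => []
  | a :: as, c :: cs => (if c = '1' then PySem.Int.bxor a 1 else a) :: pvXorUpd as cs

theorem pvXorUpd_length (acc : List Int) (b : List Char) : (pvXorUpd acc b).length = acc.length := by
  induction acc generalizing b with
  | nil => cases b <;> rfl
  | cons a as ih => cases b with
    | nil => rfl
    | cons c cs => simp [pvXorUpd, ih]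

theorem pvXorUpd_getD (acc : List Int) (b : List Char) (j : Nat) (hj : j < acc.length) :
    (pvXorUpd acc b).getD j 0 =
      if j < b.length ∧ b.getD j ' ' = '1' then PySem.Int.bxor (acc.getD j 0) 1
      else acc.getD j 0 := by
  induction acc generalizing b j with
  | nil => simp at hj
  | cons a as ih =>
    cases b with
    | nil => simp [pvXorUpd]
    | cons c cs =>
      cases j with
      | zero => simp [pvXorUpd]
      | succ k => simpa [pvXorUpd, Nat.succ_lt_succ_iff] using ih cs k (by simpa using hj)

-- B's inner enumerate fold on the accumulator component IS pvXorUpd (past position k)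
theorem pvInner_acc (b : List Char) (k : Nat) (acc : List Int) :
    (PySem.List.enumerate b (k : Int)).foldl
      (fun acc jb =>
        if jb.2 = '1' then
          PySem.List.pySetD acc jb.1 (PySem.Int.bxor (PySem.List.pyGetD acc jb.1 0) 1)
        else acc) acc
      = acc.take k ++ pvXorUpd (acc.drop k) b := by
  induction b generalizing k acc with
  | nil => simp [PySem.List.enumerate_nil, pvXorUpd]
  | cons c cs ih =>
    rw [PySem.List.enumerate_cons, List.foldl_cons]
    have hk1 : ((k : Int) + 1) = ((k + 1 : Nat) : Int) := by push_cast; ring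
    by_cases hc : c = '1'
    · simp only [hc, if_true, PySem.List.pySetD_natCast, PySem.List.pyGetD_natCast, hk1]
      rw [ih]
      by_cases hlt : k < acc.length
      · obtain ⟨a, rest, hd⟩ : ∃ a rest, acc.drop k = a :: rest := by
          cases h : acc.drop k with
          | nil => exact absurd (List.drop_eq_nil_iff.mp h) (by omega)
          | cons a rest => exact ⟨a, rest, rfl⟩
        have ha : acc[k]? = some a := by
          have h0 := congrArg (fun l => l[0]?) hd
          simpa using h0
        have hga : acc.getD k 0 = a := by
          simp [List.getD_eq_getElem?_getD, ha]
        have hset : acc.set k (PySem.Int.bxor a 1) =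
            acc.take k ++ (PySem.Int.bxor a 1) :: rest := by
          conv_lhs => rw [← List.take_append_drop k acc, hd]
          rw [List.set_append]
          simp [List.length_take, Nat.min_eq_left (Nat.le_of_lt hlt)]
        rw [hga, hset, hd]
        have hlen : (acc.take k).length = k := by simp [Nat.le_of_lt hlt]
        conv_lhs => rw [show k + 1 = (acc.take k).length + 1 from by rw [hlen]]
        rw [List.take_length_add_append, List.drop_length_add_append]
        simp [pvXorUpd]
      · have hle : acc.length ≤ k := by omega
        have hle1 : acc.length ≤ k + 1 := by omega
        rw [List.set_eq_of_length_le hle]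
        rw [List.take_of_length_le hle, List.take_of_length_le hle1,
            List.drop_eq_nil_of_le hle, List.drop_eq_nil_of_le hle1]
        cases cs <;> simp [pvXorUpd]
    · simp only [if_neg hc, hk1]
      rw [ih]
      by_cases hlt : k < acc.length
      · obtain ⟨a, rest, hd⟩ : ∃ a rest, acc.drop k = a :: rest := by
          cases h : acc.drop k with
          | nil => exact absurd (List.drop_eq_nil_iff.mp h) (by omega)
          | cons a rest => exact ⟨a, rest, rfl⟩
        have htk : acc.take (k + 1) = acc.take k ++ [a] := by
          rw [List.take_succ]
          have ha : acc[k]? = some a := by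
            have h0 := congrArg (fun l => l[0]?) hd
            simpa using h0
          simp [ha]
        have hdk : acc.drop (k + 1) = rest := by
          rw [← List.drop_drop, hd]; rfl
        rw [htk, hdk, hd]
        simp [pvXorUpd, hc]
      · have hle : acc.length ≤ k := by omega
        have hle1 : acc.length ≤ k + 1 := by omega
        rw [List.take_of_length_le hle, List.take_of_length_le hle1,
            List.drop_eq_nil_of_le hle, List.drop_eq_nil_of_le hle1]
        cases cs <;> simp [pvXorUpd]

-- parity fold: xor-toggling over a list computes countP mod 2
theorem pvFold_bxor {β : Type} (l : List β) (p : β → Prop) [DecidablePred p] (a : Nat) :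
    l.foldl (fun x e => if p e then PySem.Int.bxor x 1 else x) ((a % 2 : Nat) : Int)
      = (((a + l.countP (fun e => decide (p e))) % 2 : Nat) : Int) := by
  induction l generalizing a with
  | nil => simp
  | cons c cs ih =>
    rw [List.foldl_cons, List.countP_cons]
    by_cases hc : p c
    · have h1 : PySem.Int.bxor ((a % 2 : Nat) : Int) 1 = (((a + 1) % 2 : Nat) : Int) := by
        rcases Nat.mod_two_eq_zero_or_one a with h | h <;>
          · rw [h]
            have h2 : (a + 1) % 2 = 1 - a % 2 := by omega
            rw [h2, h]; decide
      rw [if_pos hc, h1, ih (a + 1)]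
      congr 1
      simp [hc]; omega
    · rw [if_neg hc, ih a]
      congr 1
      simp [hc]

-- length of the accumulator is preserved through B's pass
theorem pvColFold_length (bs : List (List Char)) (acc : List Int) :
    (bs.foldl pvXorUpd acc).length = acc.length := by
  induction bs generalizing acc with
  | nil => rfl
  | cons b bs ih => rw [List.foldl_cons, ih, pvXorUpd_length]

-- pointwise view of B's accumulator after the whole pass
theorem pvColFold_getD (bs : List (List Char)) (acc : List Int) (j : Nat) (hj : j < acc.length) :
    (bs.foldl pvXorUpd acc).getD j 0 =
      bs.foldl (fun x b => if j < b.length ∧ b.getD j ' ' = '1' then PySem.Int.bxor x 1 else x)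
        (acc.getD j 0) := by
  induction bs generalizing acc with
  | nil => rfl
  | cons b bs ih =>
    rw [List.foldl_cons, List.foldl_cons, ih _ (by rw [pvXorUpd_length]; exact hj),
        pvXorUpd_getD _ _ _ hj]

-- the row/column character both ports emit, as a function of the ones count
def pvChar (n : Nat) : Char := if ((n % 2 : Nat) : Int) ≠ 0 then '1' else '0'

theorem pvCount_eq (block : List Char) :
    block.countP (fun e => decide (e = '1')) = block.count '1' := by
  rw [List.count_eq_countP]
  apply List.countP_congr
  intro x _
  cases h : x == '1' <;> simp_all

-- B's inner enumerate fold computes the ones parity and pvXorUpd in one pass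
theorem pvInnerPair (block : List Char) (acc : List Int) :
    (PySem.List.enumerate block 0).foldl
      (fun (p : Int × List Int) jb =>
        if jb.2 = '1' then
          (PySem.Int.bxor p.1 1,
           PySem.List.pySetD p.2 jb.1 (PySem.Int.bxor (PySem.List.pyGetD p.2 jb.1 0) 1))
        else p) ((0 : Int), acc)
    = (((block.count '1' % 2 : Nat) : Int), pvXorUpd acc block) := by
  have hsp : (fun (p : Int × List Int) (jb : Int × Char) =>
      if jb.2 = '1' then
        (PySem.Int.bxor p.1 1,
         PySem.List.pySetD p.2 jb.1 (PySem.Int.bxor (PySem.List.pyGetD p.2 jb.1 0) 1))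
      else p)
      = fun p jb =>
        ((fun x (jb : Int × Char) => if jb.2 = '1' then PySem.Int.bxor x 1 else x) p.1 jb,
         (fun a (jb : Int × Char) =>
            if jb.2 = '1' then PySem.List.pySetD a jb.1 (PySem.Int.bxor (PySem.List.pyGetD a jb.1 0) 1)
            else a) p.2 jb) := by
    funext p jb
    by_cases h : jb.2 = '1' <;> simp [h]
  rw [hsp, PySem.List.foldl_prod_mk
    (fun x (jb : Int × Char) => if jb.2 = '1' then PySem.Int.bxor x 1 else x)
    (fun a (jb : Int × Char) =>
      if jb.2 = '1' then PySem.List.pySetD a jb.1 (PySem.Int.bxor (PySem.List.pyGetD a jb.1 0) 1)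
      else a)
    (PySem.List.enumerate block 0) 0 acc]
  have h1 : (PySem.List.enumerate block 0).foldl
      (fun x (jb : Int × Char) => if jb.2 = '1' then PySem.Int.bxor x 1 else x) (0 : Int)
      = ((block.count '1' % 2 : Nat) : Int) := by
    have e1 : (PySem.List.enumerate block 0).foldl
        (fun x (jb : Int × Char) => if jb.2 = '1' then PySem.Int.bxor x 1 else x) ((0 % 2 : Nat) : Int)
        = block.foldl (fun x c => if c = '1' then PySem.Int.bxor x 1 else x) ((0 % 2 : Nat) : Int) := by
      conv_rhs => rw [← PySem.List.map_snd_enumerate block 0]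
      rw [List.foldl_map]
    have e2 := pvFold_bxor block (fun c => c = '1') 0
    rw [pvCount_eq] at e2
    have e0 : ((0 % 2 : Nat) : Int) = (0 : Int) := by norm_num
    rw [e0] at e1 e2
    rw [e1, e2]
    norm_num
  have h2 := pvInner_acc block 0 acc
  simp only [Nat.cast_zero, List.take_zero, List.drop_zero, List.nil_append] at h2
  rw [h1, h2]

-- B's whole pass = the row-character map paired with the column accumulator fold
theorem pvBfold (bl : List (List Char)) (m : Nat) :
    bl.foldl
      (fun (st : List Char × List Int) block =>
        let inner := (PySem.List.enumerate block 0).foldl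
          (fun (p : Int × List Int) jb =>
            if jb.2 = '1' then
              (PySem.Int.bxor p.1 1,
               PySem.List.pySetD p.2 jb.1 (PySem.Int.bxor (PySem.List.pyGetD p.2 jb.1 0) 1))
            else p)
          ((0 : Int), st.2)
        (st.1 ++ [if inner.1 ≠ 0 then '1' else '0'], inner.2))
      (([] : List Char), List.replicate m (0 : Int))
    = (bl.map (fun b => pvChar (b.count '1')), bl.foldl pvXorUpd (List.replicate m 0)) := by
  have hstep : (fun (st : List Char × List Int) block =>
      let inner := (PySem.List.enumerate block 0).foldl
        (fun (p : Int × List Int) jb =>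
          if jb.2 = '1' then
            (PySem.Int.bxor p.1 1,
             PySem.List.pySetD p.2 jb.1 (PySem.Int.bxor (PySem.List.pyGetD p.2 jb.1 0) 1))
          else p)
        ((0 : Int), st.2)
      (st.1 ++ [if inner.1 ≠ 0 then '1' else '0'], inner.2))
      = fun st block =>
        ((fun x (b : List Char) => x ++ [pvChar (b.count '1')]) st.1 block,
         (fun a (b : List Char) => pvXorUpd a b) st.2 block) := by
    funext st block
    simp only [pvInnerPair, pvChar]
  rw [hstep, PySem.List.foldl_prod_mk
    (fun x (b : List Char) => x ++ [pvChar (b.count '1')])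
    (fun a (b : List Char) => pvXorUpd a b) bl [] (List.replicate m 0),
    PySem.List.foldl_append_singleton_eq_map, List.nil_append]

-- the column strings agree
theorem pvColEq (bl : List (List Char)) (m : Nat) :
    (bl.foldl pvXorUpd (List.replicate m 0)).map (fun x => if x ≠ 0 then '1' else '0')
      = (PySem.List.pyRange 0 (m : Int) 1).map
          (fun j =>
            if PySem.Int.mod
                (bl.foldl
                  (fun c block =>
                    if j < (block.length : Int) ∧ PySem.List.pyGetD block j ' ' = '1' then c + 1 else c)
                  (0 : Int)) 2 ≠ 0
            then '1' else '0') := by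
  rw [PySem.List.pyRange_zero_nat, List.map_map]
  apply List.ext_getElem
  · simp [pvColFold_length]
  · intro j h1 h2
    rw [List.getElem_map, List.getElem_map, List.getElem_range]
    simp only [Function.comp_apply]
    have hjm : j < m := by simpa using h2
    have hlen : j < (bl.foldl pvXorUpd (List.replicate m (0:Int))).length := by
      rw [pvColFold_length]; simpa using hjm
    have hF : (bl.foldl pvXorUpd (List.replicate m (0:Int))).getD j 0 =
        ((bl.countP (fun b => decide (j < b.length ∧ b.getD j ' ' = '1')) % 2 : Nat) : Int) := by
      rw [pvColFold_getD _ _ _ (by simpa using hjm)]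
      have h0 : (List.replicate m (0:Int)).getD j 0 = ((0 % 2 : Nat) : Int) := by
        simp [List.getD_eq_getElem?_getD, hjm]
      rw [h0, pvFold_bxor]
      norm_num
    rw [← List.getD_eq_getElem _ 0 hlen, hF]
    have hcnt : bl.foldl
        (fun c block =>
          if (j : Int) < (block.length : Int) ∧ PySem.List.pyGetD block (j : Int) ' ' = '1' then c + 1
          else c) (0 : Int)
        = ((bl.countP (fun b => decide (j < b.length ∧ b.getD j ' ' = '1')) : Nat) : Int) := by
      rw [PySem.List.foldl_ite_add_one
        (fun block => (j : Int) < (block.length : Int) ∧ PySem.List.pyGetD block (j : Int) ' ' = '1')]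
      have : bl.countP
          (fun b => decide ((j : Int) < (b.length : Int) ∧ PySem.List.pyGetD b (j : Int) ' ' = '1'))
          = bl.countP (fun b => decide (j < b.length ∧ b.getD j ' ' = '1')) := by
        apply List.countP_congr
        intro b _
        simp [PySem.List.pyGetD_natCast, Nat.cast_lt]
      rw [this]
      norm_num
    rw [hcnt]
    have hmod : PySem.Int.mod
        ((bl.countP (fun b => decide (j < b.length ∧ b.getD j ' ' = '1')) : Nat) : Int) 2
        = ((bl.countP (fun b => decide (j < b.length ∧ b.getD j ' ' = '1')) % 2 : Nat) : Int) := by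
      exact_mod_cast PySem.Int.mod_natCast _ 2
    rw [hmod]

-- ===== VERDICT (by name: the statement is the Claim_ definition above) =====
theorem calculate_2d_parity_spec : Claim_equal_calculate_2d_parity := by
  intro text bs hdom hpre
  show calculate_2d_parity text bs = calculate_2d_parity_alt text bs
  simp only [calculate_2d_parity, calculate_2d_parity_alt]
  generalize (PySem.List.pyRange 0 ((text_to_binary text).length : Int) bs).map
      (fun i => PySem.List.slice (text_to_binary text) (some i) (some (i + bs))) = blocks
  cases blocks with
  | nil => rfl
  | cons b0 rest =>
    simp only [List.isEmpty_cons, if_neg (by decide : ¬(false = true)), List.headI]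
    rw [pvBfold]
    congr 1
    rw [PySem.List.foldl_append_singleton_eq_map, List.nil_append,
        PySem.List.foldl_append_singleton_eq_map, List.nil_append]
    congr 1
    · apply List.map_congr_left
      intro b _
      have hmod : PySem.Int.mod ((b.count '1' : Nat) : Int) 2 = ((b.count '1' % 2 : Nat) : Int) := by
        exact_mod_cast PySem.Int.mod_natCast _ 2
      simp only [hmod, pvChar]
    · exact (pvColEq (b0 :: rest) b0.length).symm
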